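-- pv_equiv track=rewrite | github.com/0Gangstar/Unknown-s-adventures | Map.py | clear_line
-- ===== SOURCE A (Python) =====
-- def clear_line(line):  # delete all space from text line
--     new_line = ''
--     text_found = False
--     for symb in line:
--         if symb == ' ':
--             if text_found is True:
--                 break
--         else:
--             if text_found is False:
--                 text_found = True
--             new_line += symb
--     return new_line
-- ===== SOURCE B (Python) =====
-- def clear_line(line):  # delete all space from text line
--     s = line.lstrip(' ')
--     idx = s.find(' ')
--     return s if idx == -1 else s[:idx]
-- ===== Notes on version B (the rewrite author's own statement) =====
-- stated objective: simpler
-- what changed: Replaces the stateful per-character accumulation loop (text_found flag, break) with a three-line strip-then-locate-then-slice decomposition: drop leading spaces, find the next space, slice up to it.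
import Mathlib
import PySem

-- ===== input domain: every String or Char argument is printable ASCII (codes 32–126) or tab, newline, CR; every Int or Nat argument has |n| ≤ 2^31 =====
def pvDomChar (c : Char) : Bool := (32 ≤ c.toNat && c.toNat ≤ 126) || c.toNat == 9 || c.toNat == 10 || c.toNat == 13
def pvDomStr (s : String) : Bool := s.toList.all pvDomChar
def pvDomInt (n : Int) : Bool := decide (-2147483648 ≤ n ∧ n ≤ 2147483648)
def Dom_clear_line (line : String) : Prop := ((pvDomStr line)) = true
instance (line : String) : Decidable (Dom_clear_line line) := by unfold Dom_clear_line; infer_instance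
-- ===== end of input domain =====

-- B replaces A's stateful accumulation loop with an lstrip(' ')/find(' ')/slice decomposition (simpler; return value only).

-- ===== PORT A =====
-- A's for-loop with state (new_line, text_found) and 'break' on a space after text was found.
def clearLineLoop : List Char → List Char → Bool → List Char
  | [], newLine, _ => newLine
  | symb :: rest, newLine, textFound =>
    if symb == ' ' then
      if textFound then newLine           -- break
      else clearLineLoop rest newLine textFound
    else
      clearLineLoop rest (newLine ++ [symb]) true

def clear_line (line : String) : String :=
  String.ofList (clearLineLoop line.toList [] false)

-- ===== PORT B =====
def clear_line_alt (line : String) : String :=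
  -- line.lstrip(' ') ported by hand: dropping exactly the leading ' ' characters is exact for lstrip(' ')
  let s : List Char := line.toList.dropWhile (· == ' ')
  let idx : Int := PySem.Chars.find s [' ']
  if idx = -1 then String.ofList s
  else String.ofList (PySem.Chars.slice s none (some idx))

-- ===== PRECONDITION & SPEC =====
def Spec_clear_line (line : String) (out : String) : Prop := out = clear_line_alt line
instance (line : String) (out : String) : Decidable (Spec_clear_line line out) := by unfold Spec_clear_line; infer_instance

-- ===== CLAIM (what is proved, stated in full; the proofs are below) =====
def Claim_equal_clear_line : Prop := ∀ (line : String), Dom_clear_line line → Spec_clear_line line (clear_line line)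

-- ===== LEMMAS AND PROOFS =====

-- A's loop with the flag already set collects the longest non-space prefix.
theorem clearLineLoop_true (cs acc : List Char) :
    clearLineLoop cs acc true = acc ++ cs.takeWhile (· ≠ ' ') := by
  induction cs generalizing acc with
  | nil => simp [clearLineLoop]
  | cons c rest ih =>
    by_cases h : c = ' ' <;> simp [clearLineLoop, h, ih]

-- A's loop with the flag unset first skips leading spaces.
theorem clearLineLoop_false (cs acc : List Char) :
    clearLineLoop cs acc false = acc ++ (cs.dropWhile (· == ' ')).takeWhile (· ≠ ' ') := by
  induction cs generalizing acc with
  | nil => simp [clearLineLoop]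
  | cons c rest ih =>
    by_cases h : c = ' ' <;>
      simp [clearLineLoop, h, ih, clearLineLoop_true]

-- [' '] is a prefix of l iff l starts with ' '.
theorem singleton_prefix_iff (l : List Char) : [' '] <+: l ↔ l.head? = some ' ' := by
  cases l with
  | nil => simp
  | cons a t =>
    constructor
    · rintro ⟨u, hu⟩; simp_all
      exact hu.1.symm
    · intro h; simp at h; exact ⟨t, by simp [h]⟩

-- takeWhile equals take n when the first n elements satisfy p and the n-th fails it.
theorem takeWhile_eq_take_of (p : Char → Bool) (l : List Char) (n : Nat)
    (hlt : ∀ i, (h : i < l.length) → i < n → p l[i] = true)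
    (hn : ∀ (h : n < l.length), p l[n] = false) :
    l.takeWhile p = l.take n := by
  induction l generalizing n with
  | nil => simp
  | cons a t ih =>
    cases n with
    | zero =>
      have := hn (by simp)
      simp_all
    | succ m =>
      have ha : p a = true := hlt 0 (by simp) (by omega)
      simp [ha]
      exact ih m (fun i h hi => hlt (i+1) (by simpa using Nat.succ_lt_succ h) (by omega))
        (fun h => hn (by simpa using Nat.succ_lt_succ h))

-- B's find/slice step computes the longest non-space prefix.
theorem find_slice_eq_takeWhile (s : List Char) :
    (if PySem.Chars.find s [' '] = -1 then s
     else PySem.Chars.slice s none (some (PySem.Chars.find s [' ']))) =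
    s.takeWhile (· ≠ ' ') := by
  by_cases h : PySem.Chars.find s [' '] = -1
  · rw [if_pos h]
    have hni : ¬ [' '] <:+: s := (PySem.Chars.find_eq_neg_one_iff s [' ']).mp h
    have hmem : ' ' ∉ s := by
      intro hm
      obtain ⟨l1, l2, rfl⟩ := List.append_of_mem hm
      exact hni ⟨l1, l2, by simp⟩
    symm
    exact List.takeWhile_eq_self_iff.mpr (fun c hc => by
      simp only [decide_eq_true_eq]; rintro rfl; exact hmem hc)
  · rw [if_neg h]
    have hpos : 0 ≤ PySem.Chars.find s [' '] :=
      (PySem.Chars.find_nonneg_iff s [' ']).mpr (by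
        rcases (PySem.Chars.find_ne_neg_one_iff s [' ']).mp h with hinf
        exact hinf)
    set n : Nat := (PySem.Chars.find s [' ']).toNat with hn
    have hspec := PySem.Chars.find_spec hpos
    rw [PySem.Chars.slice_eq_listSlice, PySem.List.slice_to _ hpos]
    symm
    apply takeWhile_eq_take_of
    · intro i hi hilt
      have hnp : ¬ [' '] <+: s.drop i := hspec.2 i hilt
      rw [singleton_prefix_iff] at hnp
      have : (s.drop i).head? = some s[i] := by
        rw [List.head?_drop]; simp [hi]
      simp [this] at hnp
      simpa using hnp
    · intro hlen
      have hp := hspec.1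
      rw [singleton_prefix_iff] at hp
      have : (s.drop n).head? = some s[n] := by
        rw [List.head?_drop]; simp
      rw [this] at hp
      simp at hp
      simp only [decide_eq_false_iff_not, not_not]
      exact hp

-- ===== VERDICT (by name: the statement is the Claim_ definition above) =====
theorem clear_line_spec : Claim_equal_clear_line := by
  intro line _
  unfold Spec_clear_line clear_line clear_line_alt
  simp only [clearLineLoop_false, List.nil_append]
  show String.ofList ((line.toList.dropWhile (· == ' ')).takeWhile (· ≠ ' ')) =
    (if PySem.Chars.find (line.toList.dropWhile (· == ' ')) [' '] = -1 then
      String.ofList (line.toList.dropWhile (· == ' '))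
    else
      String.ofList (PySem.Chars.slice (line.toList.dropWhile (· == ' ')) none
        (some (PySem.Chars.find (line.toList.dropWhile (· == ' ')) [' ']))))
  rw [← apply_ite String.ofList]
  exact congrArg String.ofList (find_slice_eq_takeWhile _).symm
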